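-- pv_equiv track=rewrite | github.com/jknierum/ttoad | ttoad.py | find_and_highlight
-- ===== SOURCE A (Python) =====
-- def find_all(text, word):
--     results = []
--
--     if not word:
--         return results
--
--     word_len = len(word)
--     word_lower = word.lower()  # Convert search word to lowercase once
--
--     for y, line in enumerate(text):
--         x = 0
--         line_lower = line.lower()  # Convert current line to lowercase
--
--         while True:
--             x = line_lower.find(word_lower, x)  # Search in lowercase version
--
--             if x == -1:
--                 break
--
--             start_y = y
--             start_x = x
--             end_y = y
--             end_x = x + word_len
--
--             results.append((start_y, start_x, end_y, end_x))
--
--             x += word_len  # move forward to avoid infinite loop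
--
--     return results
--
-- def find_and_highlight(text, query, cursor_y, cursor_x, scroll_pos_y, visible_height):
--     """Find all matches and return matches list and visible matches for highlighting"""
--     if not query:
--         return [], []
--
--     matches = find_all(text, query)
--
--     # Filter matches that are visible on screen
--     visible_matches = []
--     for start_y, start_x, end_y, end_x in matches:
--         if start_y >= scroll_pos_y and start_y < scroll_pos_y + visible_height:
--             visible_matches.append((start_y, start_x, end_y, end_x))
--
--     return matches, visible_matches
-- ===== SOURCE B (Python) =====
-- def find_and_highlight(text, query, cursor_y, cursor_x, scroll_pos_y, visible_height):
--     """Find all matches and return matches list and visible matches for highlighting"""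
--     if not query:
--         return [], []
--     qlow = query.lower()
--     qlen = len(qlow)
--     matches = []
--     for y, line in enumerate(text):
--         low = line.lower()
--         # stage 1: every (possibly overlapping) occurrence start in this line
--         occ = [j for j in range(len(low) - qlen + 1) if low[j:j + qlen] == qlow]
--         # stage 2: greedy left-to-right selection of the non-overlapping ones
--         nxt = 0
--         for j in occ:
--             if j >= nxt:
--                 matches.append((y, j, y, j + qlen))
--                 nxt = j + qlen
--     visible = [m for m in matches if scroll_pos_y <= m[0] < scroll_pos_y + visible_height]
--     return matches, visible
-- ===== Notes on version B (the rewrite author's own statement) =====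
-- stated objective: alternative
-- what changed: Replaces A's find-and-jump while loop per line by a two-stage algorithm: first enumerate ALL (possibly overlapping) occurrence starts by slice comparison over a range comprehension, then greedily select the non-overlapping subset left-to-right with a threshold; the visibility loop becomes a comprehension.
import Mathlib
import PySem

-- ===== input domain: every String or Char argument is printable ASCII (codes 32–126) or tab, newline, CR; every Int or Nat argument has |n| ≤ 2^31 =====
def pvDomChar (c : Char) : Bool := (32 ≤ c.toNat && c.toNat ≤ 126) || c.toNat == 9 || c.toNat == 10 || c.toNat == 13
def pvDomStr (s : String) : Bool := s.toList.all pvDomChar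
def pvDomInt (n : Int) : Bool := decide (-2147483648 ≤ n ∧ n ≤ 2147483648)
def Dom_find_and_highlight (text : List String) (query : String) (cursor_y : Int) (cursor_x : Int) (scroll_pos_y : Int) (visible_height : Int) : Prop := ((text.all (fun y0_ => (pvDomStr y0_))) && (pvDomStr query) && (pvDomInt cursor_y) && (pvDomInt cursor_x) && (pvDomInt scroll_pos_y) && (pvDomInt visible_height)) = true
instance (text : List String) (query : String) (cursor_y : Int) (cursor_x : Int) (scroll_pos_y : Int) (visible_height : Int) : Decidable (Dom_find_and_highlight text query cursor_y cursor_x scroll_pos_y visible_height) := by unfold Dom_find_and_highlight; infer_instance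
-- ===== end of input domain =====

-- B replaces A's per-line find-and-jump while loop by a two-stage algorithm (enumerate all
-- overlapping occurrence starts, then greedily select the non-overlapping ones); return value only.

-- ===== PORT A =====
-- inner while loop of find_all: x = line_lower.find(word_lower, x); break on -1; append; x += word_len.
-- The fuel argument (called with line length + 1) is a totality guard only: each
-- iteration advances x by at least word_len ≥ 1, so the fuel is never exhausted.
def pvFindLoopA (y : Int) (low wl : List Char) (wlen : Nat) : Nat → Int → List (Int × Int × Int × Int)
  | 0, _ => []
  | fuel + 1, x =>
    let r := PySem.Chars.findFrom low wl x
    if r = -1 then []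
    else (y, r, y, r + (wlen : Int)) :: pvFindLoopA y low wl wlen fuel (r + (wlen : Int))

-- find_all(text, word)
def pvFindAll (text : List String) (word : String) : List (Int × Int × Int × Int) :=
  if word.toList = [] then []
  else
    let wlen := word.toList.length
    let wl := PySem.Chars.lower word.toList
    (PySem.List.enumerate text).foldl
      (fun acc p => acc ++ pvFindLoopA p.1 (PySem.Chars.lower p.2.toList) wl wlen ((PySem.Chars.lower p.2.toList).length + 1) 0) []

def find_and_highlight (text : List String) (query : String) (cursor_y : Int) (cursor_x : Int) (scroll_pos_y : Int) (visible_height : Int) : (List (Int × Int × Int × Int)) × (List (Int × Int × Int × Int)) :=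
  if query.toList = [] then ([], [])
  else
    let ms := pvFindAll text query
    let visible_ms := ms.foldl
      (fun acc m => if (decide (m.1 ≥ scroll_pos_y) && decide (m.1 < scroll_pos_y + visible_height)) then acc ++ [m] else acc) []
    (ms, visible_ms)

-- ===== PORT B =====
-- stage 1 of Source B: occ = [j for j in range(len(low) - qlen + 1) if low[j:j+qlen] == qlow]
-- (the slice low[j:j+qlen] is PySem.List.slice, exact)
def pvOcc (ql low : List Char) (qlen : Nat) : List Int :=
  (PySem.List.pyRange 0 ((low.length : Int) - (qlen : Int) + 1) 1).filter
    (fun j => decide (PySem.List.slice low (some j) (some (j + (qlen : Int))) = ql))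

-- per line, stage 2 of Source B: nxt = 0; for j in occ: if j >= nxt: matches.append(...); nxt = j + qlen
-- (the fold state is (matches, nxt), matches carried across lines exactly as in Source B)
def find_and_highlight_alt (text : List String) (query : String) (cursor_y : Int) (cursor_x : Int) (scroll_pos_y : Int) (visible_height : Int) : (List (Int × Int × Int × Int)) × (List (Int × Int × Int × Int)) :=
  if query.toList = [] then ([], [])
  else
    let ql := PySem.Chars.lower query.toList
    let qlen := ql.length
    let ms := (PySem.List.enumerate text).foldl
      (fun acc p =>
        ((pvOcc ql (PySem.Chars.lower p.2.toList) qlen).foldl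
          (fun (st : List (Int × Int × Int × Int) × Int) j =>
            if st.2 ≤ j then (st.1 ++ [(p.1, j, p.1, j + (qlen : Int))], j + (qlen : Int)) else st)
          (acc, 0)).1) []
    (ms, ms.filter (fun m => decide (scroll_pos_y ≤ m.1) && decide (m.1 < scroll_pos_y + visible_height)))

-- ===== PRECONDITION & SPEC =====
def Spec_find_and_highlight (text : List String) (query : String) (cursor_y : Int) (cursor_x : Int) (scroll_pos_y : Int) (visible_height : Int) (out : (List (Int × Int × Int × Int)) × (List (Int × Int × Int × Int))) : Prop := out = find_and_highlight_alt text query cursor_y cursor_x scroll_pos_y visible_height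
instance (text : List String) (query : String) (cursor_y : Int) (cursor_x : Int) (scroll_pos_y : Int) (visible_height : Int) (out : (List (Int × Int × Int × Int)) × (List (Int × Int × Int × Int))) : Decidable (Spec_find_and_highlight text query cursor_y cursor_x scroll_pos_y visible_height out) := by unfold Spec_find_and_highlight; infer_instance

-- ===== CLAIM (what is proved, stated in full; the proofs are below) =====
def Claim_equal_find_and_highlight : Prop := ∀ (text : List String) (query : String) (cursor_y : Int) (cursor_x : Int) (scroll_pos_y : Int) (visible_height : Int), Dom_find_and_highlight text query cursor_y cursor_x scroll_pos_y visible_height → Spec_find_and_highlight text query cursor_y cursor_x scroll_pos_y visible_height (find_and_highlight text query cursor_y cursor_x scroll_pos_y visible_height)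

-- ===== LEMMAS AND PROOFS =====

-- proof-only recursion computing stage 2's selected matches (the fold's .1 minus the accumulator)
def pvG (y : Int) (qlen : Nat) : List Int → Int → List (Int × Int × Int × Int)
  | [], _ => []
  | j :: rest, t =>
    if t ≤ j then (y, j, y, j + (qlen : Int)) :: pvG y qlen rest (j + (qlen : Int))
    else pvG y qlen rest t

-- the stage-2 fold equals the accumulator ++ pvG
theorem pv_fold_g (y : Int) (qlen : Nat) :
    ∀ (occ : List Int) (acc : List (Int × Int × Int × Int)) (t : Int),
    (occ.foldl
      (fun (st : List (Int × Int × Int × Int) × Int) j =>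
        if st.2 ≤ j then (st.1 ++ [(y, j, y, j + (qlen : Int))], j + (qlen : Int)) else st)
      (acc, t)).1 = acc ++ pvG y qlen occ t := by
  intro occ
  induction occ with
  | nil => intro acc t; simp [pvG]
  | cons j rest ih =>
    intro acc t
    by_cases h : t ≤ j
    · simp only [List.foldl_cons, if_pos h, pvG, ih, List.append_assoc, List.singleton_append]
    · simp only [List.foldl_cons, if_neg h, pvG, ih]

-- lower is per-character, so lengths are preserved
theorem pv_lower_length (s : List Char) : (PySem.Chars.lower s).length = s.length := by
  simp [PySem.Chars.lower]

-- soundness of stage 1: every candidate is a nonnegative genuine occurrence start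
theorem pvOcc_sound (ql low : List Char) (qlen : Nat) (hqlen : qlen = ql.length) :
    ∀ j ∈ pvOcc ql low qlen, 0 ≤ j ∧ ql <+: low.drop j.toNat := by
  intro j hj
  unfold pvOcc at hj
  rw [List.mem_filter] at hj
  obtain ⟨hr, hs⟩ := hj
  rw [PySem.List.mem_pyRange_one] at hr
  have hj0 : (0 : Int) ≤ j := hr.1
  have hs' : PySem.List.slice low (some j) (some (j + (qlen : Int))) = ql := of_decide_eq_true hs
  rw [PySem.List.slice_toNat low hj0 (by omega)] at hs'
  have htn : (j + (qlen : Int)).toNat - j.toNat = qlen := by omega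
  rw [htn] at hs'
  refine ⟨hj0, ?_⟩
  rw [hqlen] at hs'
  exact List.prefix_iff_eq_take.mpr hs'.symm

-- completeness of stage 1: every genuine occurrence start is a candidate
theorem pvOcc_complete (ql low : List Char) (qlen : Nat) (hqlen : qlen = ql.length)
    (hql : ql ≠ []) :
    ∀ m : Nat, ql <+: low.drop m → (m : Int) ∈ pvOcc ql low qlen := by
  intro m hpre
  have hlen : ql.length ≤ low.length - m := by
    have := hpre.length_le
    simpa [List.length_drop] using this
  have hq1 : 1 ≤ ql.length := List.length_pos_iff.mpr hql
  have hm : m + qlen ≤ low.length := by omega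
  unfold pvOcc
  rw [List.mem_filter]
  constructor
  · rw [PySem.List.mem_pyRange_one]
    constructor
    · exact_mod_cast Int.natCast_nonneg m
    · omega
  · apply decide_eq_true
    rw [PySem.List.slice_toNat low (by exact_mod_cast Int.natCast_nonneg m) (by positivity)]
    have htn : ((m : Int) + (qlen : Int)).toNat - (m : Int).toNat = qlen := by omega
    rw [htn, Int.toNat_natCast]
    rw [List.prefix_iff_eq_take] at hpre
    rw [hqlen, ← hpre]

-- the candidates are strictly increasing
theorem pvOcc_pairwise (ql low : List Char) (qlen : Nat) :
    (pvOcc ql low qlen).Pairwise (· < ·) :=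
  List.Pairwise.filter _ (PySem.List.pairwise_lt_pyRange_one 0 _)

-- core: A's find-and-jump loop equals greedy selection over any sound+complete sorted candidate list
theorem pvG_eq_loopA (y : Int) (ql low : List Char) (qlen : Nat)
    (hql : ql ≠ []) (hqlen : qlen = ql.length) :
    ∀ (l : List Int), l.Pairwise (· < ·) →
    (∀ j ∈ l, 0 ≤ j ∧ ql <+: low.drop j.toNat) →
    ∀ (fuel t : Nat), t ≤ low.length →
    (∀ m : Nat, t ≤ m → ql <+: low.drop m → (m : Int) ∈ l) →
    low.length + 1 - t ≤ fuel →
    pvFindLoopA y low ql qlen fuel (t : Int) = pvG y qlen l (t : Int) := by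
  have hq1 : 1 ≤ qlen := hqlen ▸ List.length_pos_iff.mpr hql
  intro l
  induction l with
  | nil =>
    intro _ _ fuel t ht hcomp hfuel
    cases fuel with
    | zero => omega
    | succ f =>
      rw [pvFindLoopA]
      have hr : PySem.Chars.findFrom low ql (t : Int) = -1 := by
        rw [PySem.Chars.findFrom_natCast_eq_neg_one_iff low ql t ht]
        intro hinf
        rw [← PySem.Chars.isIn_iff_infix, ← PySem.Chars.exists_prefix_drop_iff_isIn] at hinf
        obtain ⟨k, hk⟩ := hinf
        rw [List.drop_drop] at hk
        exact absurd (hcomp (t + k) (by omega) hk) (List.not_mem_nil)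
      simp [hr, pvG]
  | cons j rest ih =>
    intro hpw hsound fuel t ht hcomp hfuel
    obtain ⟨hj0, hjpre⟩ := hsound j List.mem_cons_self
    set m := j.toNat with hmdef
    have hjm : j = (m : Int) := (Int.toNat_of_nonneg hj0).symm
    have hlenm : ql.length ≤ low.length - m := by
      have := hjpre.length_le; simpa [List.length_drop] using this
    have hmq : m + qlen ≤ low.length := by omega
    by_cases hskip : m < t
    · -- candidate below the threshold: skipped by greedy, invisible to A
      rw [hjm, pvG]
      rw [if_neg (by exact_mod_cast by omega)]
      exact ih hpw.of_cons (fun x hx => hsound x (List.mem_cons_of_mem _ hx)) fuel t ht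
        (fun m' hm' hpre' => by
          rcases List.mem_cons.mp (hcomp m' hm' hpre') with h | h
          · rw [hjm] at h
            have hmm : m' = m := by exact_mod_cast h
            omega
          · exact h) hfuel
    · -- t ≤ m: m is the first match ≥ t, A's findFrom returns it
      cases fuel with
      | zero => omega
      | succ f =>
        rw [pvFindLoopA]
        have hne : PySem.Chars.findFrom low ql (t : Int) ≠ -1 := by
          intro heq
          rw [PySem.Chars.findFrom_natCast_eq_neg_one_iff low ql t ht] at heq
          apply heq
          rw [← PySem.Chars.isIn_iff_infix, ← PySem.Chars.exists_prefix_drop_iff_isIn]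
          refine ⟨m - t, ?_⟩
          rw [List.drop_drop]
          convert hjpre using 2
          omega
        obtain ⟨h1, h2, h3⟩ := PySem.Chars.findFrom_natCast_spec low ql t ht hne
        set r := PySem.Chars.findFrom low ql (t : Int) with hrdef
        have hr0 : (0 : Int) ≤ r := le_trans (by exact_mod_cast Int.natCast_nonneg t) h1
        have hrm : r.toNat = m := by
          rcases lt_trichotomy r.toNat m with hlt | heq | hgt
          · exfalso
            have hmem := hcomp r.toNat (by omega) h2
            rcases List.mem_cons.mp hmem with h | h
            · rw [hjm] at h
              have hrm' : r.toNat = m := by exact_mod_cast h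
              omega
            · have hlt2 := (List.pairwise_cons.mp hpw).1 _ h
              rw [hjm] at hlt2
              have hmr : m < r.toNat := by exact_mod_cast hlt2
              omega
          · exact heq
          · exact absurd (h3 m (by omega) hgt) (not_not.mpr hjpre)
        have hreq : r = (m : Int) := by omega
        rw [if_neg hne, hjm, pvG, if_pos (by exact_mod_cast by omega : (t : Int) ≤ (m : Int))]
        rw [hreq]
        have hcast : ((m : Int)) + ((qlen : Nat) : Int) = ((m + qlen : Nat) : Int) := by push_cast; ring
        rw [hcast]
        refine congrArg (List.cons _) ?_
        exact ih hpw.of_cons (fun x hx => hsound x (List.mem_cons_of_mem _ hx)) f (m + qlen)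
          hmq
          (fun m' hm' hpre' => by
            rcases List.mem_cons.mp (hcomp m' (by omega) hpre') with h | h
            · rw [hjm] at h
              have hmm : m' = m := by exact_mod_cast h
              omega
            · exact h)
          (by omega)

-- per line: A's loop started at 0 with full fuel equals greedy selection over the candidates
theorem pv_line_eq (y : Int) (ql low : List Char) (qlen : Nat)
    (hql : ql ≠ []) (hqlen : qlen = ql.length) :
    pvFindLoopA y low ql qlen (low.length + 1) 0 = pvG y qlen (pvOcc ql low qlen) 0 := by
  have := pvG_eq_loopA y ql low qlen hql hqlen (pvOcc ql low qlen)
    (pvOcc_pairwise ql low qlen) (pvOcc_sound ql low qlen hqlen)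
    (low.length + 1) 0 (Nat.zero_le _)
    (fun m _ hpre => pvOcc_complete ql low qlen hqlen hql m hpre)
    (by omega)
  simpa using this

-- ===== VERDICT (by name: the statement is the Claim_ definition above) =====
theorem find_and_highlight_spec : Claim_equal_find_and_highlight := by
  intro text query cursor_y cursor_x scroll_pos_y visible_height _
  unfold Spec_find_and_highlight find_and_highlight find_and_highlight_alt pvFindAll
  by_cases hq : query.toList = []
  · simp [hq]
  · have hql : PySem.Chars.lower query.toList ≠ [] := by
      simp [PySem.Chars.lower, hq]
    have hwlen : query.toList.length = (PySem.Chars.lower query.toList).length :=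
      (pv_lower_length query.toList).symm
    simp only [if_neg hq]
    have hmatch :
        (PySem.List.enumerate text).foldl
          (fun acc p => acc ++ pvFindLoopA p.1 (PySem.Chars.lower p.2.toList) (PySem.Chars.lower query.toList) query.toList.length ((PySem.Chars.lower p.2.toList).length + 1) 0) []
        = (PySem.List.enumerate text).foldl
          (fun acc p =>
            ((pvOcc (PySem.Chars.lower query.toList) (PySem.Chars.lower p.2.toList) (PySem.Chars.lower query.toList).length).foldl
              (fun (st : List (Int × Int × Int × Int) × Int) j =>
                if st.2 ≤ j then (st.1 ++ [(p.1, j, p.1, j + ((PySem.Chars.lower query.toList).length : Int))], j + ((PySem.Chars.lower query.toList).length : Int)) else st)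
              (acc, 0)).1) [] := by
      congr 1
      funext acc p
      rw [pv_fold_g, hwlen, pv_line_eq p.1 (PySem.Chars.lower query.toList) (PySem.Chars.lower p.2.toList) _ hql rfl]
    rw [hmatch]
    refine Prod.ext rfl ?_
    simp only [ge_iff_le]
    exact (PySem.List.foldl_append_if
      (fun m : Int × Int × Int × Int => decide (scroll_pos_y ≤ m.1) && decide (m.1 < scroll_pos_y + visible_height))
      id _ []).trans (by simp)
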